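-- pv_equiv track=rewrite | github.com/mcGeorge66/OpenForexAI | openforexai/config/json_loader.py | _path_matches_rule
-- ===== SOURCE A (Python) =====
-- def _normalize_path(path: str) -> str:
--     return path.strip().strip(".")
--
-- def _path_matches_rule(path: str, rule: str) -> bool:
--     """Match dot-path with '*' wildcard per segment."""
--     p = _normalize_path(path)
--     r = _normalize_path(rule)
--     if not r:
--         return False
--     p_parts = p.split(".") if p else []
--     r_parts = r.split(".")
--     if len(p_parts) != len(r_parts):
--         return False
--     for pp, rp in zip(p_parts, r_parts):
--         if rp == "*":
--             continue
--         if pp != rp: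
--             return False
--     return True
-- ===== SOURCE B (Python) =====
-- def _normalize_path(path: str) -> str:
--     return path.strip().strip(".")
--
-- def _match_segments(ps, rs):
--     # recursion on both segment lists; length mismatch fails at a base case
--     if not rs:
--         return not ps
--     if not ps:
--         return False
--     return (rs[0] == "*" or ps[0] == rs[0]) and _match_segments(ps[1:], rs[1:])
--
-- def _path_matches_rule(path: str, rule: str) -> bool:
--     """Match dot-path with '*' wildcard per segment."""
--     r = _normalize_path(rule)
--     if not r:
--         return False
--     p = _normalize_path(path)
--     return _match_segments(p.split(".") if p else [], r.split("."))
-- ===== Notes on version B (the rewrite author's own statement) =====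
-- stated objective: simpler
-- what changed: Replaces the separate length check plus zip loop with a single recursive matcher over both segment lists, where a length mismatch fails at a base case.
import Mathlib
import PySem

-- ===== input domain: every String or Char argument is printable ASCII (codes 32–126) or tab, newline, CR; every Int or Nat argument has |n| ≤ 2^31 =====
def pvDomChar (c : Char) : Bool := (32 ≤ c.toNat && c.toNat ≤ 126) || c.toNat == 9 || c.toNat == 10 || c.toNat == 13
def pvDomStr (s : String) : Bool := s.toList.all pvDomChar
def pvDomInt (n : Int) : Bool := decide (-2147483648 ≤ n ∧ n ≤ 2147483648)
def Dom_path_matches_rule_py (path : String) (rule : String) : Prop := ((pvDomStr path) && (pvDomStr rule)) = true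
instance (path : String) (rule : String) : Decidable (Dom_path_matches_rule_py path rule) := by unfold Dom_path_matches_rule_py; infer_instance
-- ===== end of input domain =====

-- ===== PORT A =====
-- B replaces A's length check + zip loop with one recursion over both segment lists (objective: simpler).
-- _normalize_path: path.strip().strip(".")
def pvNormalize (path : String) : String :=
  PySem.Str.stripChars (PySem.Str.strip path) "."

-- s.split(".") with the literal nonempty separator (split? is none only for sep = "")
def pvSplitDot (s : String) : List String := (PySem.Str.split? s ".").getD []

-- the for-loop over zip(p_parts, r_parts) with its early returns
def pvLoopA : List (String × String) → Bool
  | [] => true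
  | (pp, rp) :: rest =>
    if rp == "*" then pvLoopA rest
    else if pp != rp then false
    else pvLoopA rest

def path_matches_rule_py (path : String) (rule : String) : Bool :=
  let p := pvNormalize path
  let r := pvNormalize rule
  if r == "" then false
  else
    let p_parts := if p == "" then [] else pvSplitDot p
    let r_parts := pvSplitDot r
    if p_parts.length != r_parts.length then false
    else pvLoopA (p_parts.zip r_parts)

-- ===== PORT B =====
-- _match_segments: recursion on both lists; length mismatch fails at a base case
def pvMatchSegments : List String → List String → Bool
  | ps, [] => ps.isEmpty
  | [], _ :: _ => false
  | pp :: ps, rp :: rs => (rp == "*" || pp == rp) && pvMatchSegments ps rs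

def path_matches_rule_py_alt (path : String) (rule : String) : Bool :=
  let r := pvNormalize rule
  if r == "" then false
  else
    let p := pvNormalize path
    pvMatchSegments (if p == "" then [] else pvSplitDot p) (pvSplitDot r)
-- ===== PRECONDITION & SPEC =====
def Spec_path_matches_rule_py (path : String) (rule : String) (out : Bool) : Prop := out = path_matches_rule_py_alt path rule
instance (path : String) (rule : String) (out : Bool) : Decidable (Spec_path_matches_rule_py path rule out) := by unfold Spec_path_matches_rule_py; infer_instance

-- ===== CLAIM (what is proved, stated in full; the proofs are below) =====
def Claim_equal_path_matches_rule_py : Prop := ∀ (path : String) (rule : String), Dom_path_matches_rule_py path rule → Spec_path_matches_rule_py path rule (path_matches_rule_py path rule)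

-- ===== LEMMAS AND PROOFS =====
theorem pvMatchSegments_eq : ∀ (ps rs : List String),
    pvMatchSegments ps rs =
      (if ps.length != rs.length then false else pvLoopA (ps.zip rs)) := by
  intro ps rs
  induction rs generalizing ps with
  | nil => cases ps <;> simp [pvMatchSegments, pvLoopA]
  | cons rp rs ih =>
    cases ps with
    | nil => simp [pvMatchSegments]
    | cons pp ps =>
      simp only [pvMatchSegments, List.zip_cons_cons, pvLoopA, ih, List.length_cons]
      by_cases h1 : rp = "*" <;> by_cases h2 : pp = rp <;> simp [h1, h2]


-- ===== VERDICT (by name: the statement is the Claim_ definition above) =====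
theorem path_matches_rule_py_spec : Claim_equal_path_matches_rule_py := by
  intro path rule _
  unfold Spec_path_matches_rule_py path_matches_rule_py path_matches_rule_py_alt
  simp only [pvMatchSegments_eq]
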